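-- pv_equiv track=rewrite | github.com/paralab/SymPyGR | dendrosym/nr_configs.py | create_grad_var_names
-- ===== SOURCE A (Python) =====
-- def create_grad_var_names(in_vars: list, grad_type="grad", ndim=3):
--     """Generate the gradient variable names
--
--     This also takes in the gradient type, which is specifically for
--     generating the full list of gradient variable names.
--
--     Notes
--     -----
--     TODO: this might not be entirely necessary, there is a backup
--     method that scans the output code for the gradient types, but
--     at least this way we can generate the actual gradient names
--     based on the full list.
--     """
--
--     grad_vars = []
--
--     # 1d gradient
--     if grad_type == "grad":
--         for curr_var in in_vars:
--             for ii in range(ndim):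
--                 grad_vars.append(f"grad_{ii}_{curr_var}")
--     # 2d gradient
--     elif grad_type == "grad2":
--         for curr_var in in_vars:
--             for ii in range(ndim):
--                 for jj in range(ndim):
--                     grad_vars.append(f"grad2_{ii}_{jj}_{curr_var}")
--     # advective gradient variables
--     elif grad_type == "agrad":
--         for curr_var in in_vars:
--             for ii in range(ndim):
--                 grad_vars.append(f"agrad_{ii}_{curr_var}")
--
--     return grad_vars
-- ===== SOURCE B (Python) =====
-- def create_grad_var_names(in_vars: list, grad_type="grad", ndim=3):
--     depth = {"grad": 1, "grad2": 2, "agrad": 1}.get(grad_type)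
--     if depth is None:
--         return []
--     tuples = [[]]
--     for _ in range(depth):
--         tuples = [t + [i] for t in tuples for i in range(ndim)]
--     return [
--         "_".join([grad_type] + [str(i) for i in t] + [v])
--         for v in in_vars
--         for t in tuples
--     ]
-- ===== Notes on version B (the rewrite author's own statement) =====
-- stated objective: simpler
-- what changed: Replaces the three hand-nested branch loops by a table mapping grad_type to an index depth plus one depth-parametrized index-tuple generation and a single comprehension.
import Mathlib
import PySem

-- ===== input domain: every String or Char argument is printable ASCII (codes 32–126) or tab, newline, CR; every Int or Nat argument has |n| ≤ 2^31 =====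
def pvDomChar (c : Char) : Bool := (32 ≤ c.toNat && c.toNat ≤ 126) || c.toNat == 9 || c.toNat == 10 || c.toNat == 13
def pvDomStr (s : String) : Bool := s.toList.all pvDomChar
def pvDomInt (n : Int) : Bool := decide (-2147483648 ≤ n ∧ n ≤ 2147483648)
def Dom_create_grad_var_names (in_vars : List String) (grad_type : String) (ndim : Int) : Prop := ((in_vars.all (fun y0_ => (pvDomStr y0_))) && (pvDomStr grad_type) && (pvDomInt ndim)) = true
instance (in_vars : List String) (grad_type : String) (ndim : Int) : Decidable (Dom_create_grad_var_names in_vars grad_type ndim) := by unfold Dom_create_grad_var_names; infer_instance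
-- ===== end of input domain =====

-- B replaces A's three hand-nested branches by a grad_type→depth table and one depth-parametrized pass (objective: simpler).


-- ===== PORT A =====
def create_grad_var_names (in_vars : List String) (grad_type : String) (ndim : Int) : List String :=
  if grad_type == "grad" then
    in_vars.foldl (fun grad_vars curr_var =>
      (PySem.List.pyRange 0 ndim 1).foldl (fun grad_vars ii =>
        grad_vars ++ ["grad_" ++ PySem.Int.toStr ii ++ "_" ++ curr_var]) grad_vars) []
  else if grad_type == "grad2" then
    in_vars.foldl (fun grad_vars curr_var =>
      (PySem.List.pyRange 0 ndim 1).foldl (fun grad_vars ii =>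
        (PySem.List.pyRange 0 ndim 1).foldl (fun grad_vars jj =>
          grad_vars ++ ["grad2_" ++ PySem.Int.toStr ii ++ "_" ++ PySem.Int.toStr jj ++ "_" ++ curr_var]) grad_vars) grad_vars) []
  else if grad_type == "agrad" then
    in_vars.foldl (fun grad_vars curr_var =>
      (PySem.List.pyRange 0 ndim 1).foldl (fun grad_vars ii =>
        grad_vars ++ ["agrad_" ++ PySem.Int.toStr ii ++ "_" ++ curr_var]) grad_vars) []
  else []

-- ===== PORT B =====
def create_grad_var_names_alt (in_vars : List String) (grad_type : String) (ndim : Int) : List String :=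
  match (PySem.Dict.ofList [("grad", (1 : Int)), ("grad2", 2), ("agrad", 1)]).get? grad_type with
  | none => []
  | some depth =>
    let tuples := (PySem.List.pyRange 0 depth 1).foldl
      (fun ts _ => ts.flatMap (fun t => (PySem.List.pyRange 0 ndim 1).map (fun i => t ++ [i]))) [[]]
    in_vars.flatMap (fun v => tuples.map (fun t =>
      PySem.Str.join "_" ([grad_type] ++ t.map PySem.Int.toStr ++ [v])))

-- ===== PRECONDITION & SPEC =====
def Spec_create_grad_var_names (in_vars : List String) (grad_type : String) (ndim : Int) (out : List String) : Prop := out = create_grad_var_names_alt in_vars grad_type ndim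
instance (in_vars : List String) (grad_type : String) (ndim : Int) (out : List String) : Decidable (Spec_create_grad_var_names in_vars grad_type ndim out) := by unfold Spec_create_grad_var_names; infer_instance

-- ===== CLAIM (what is proved, stated in full; the proofs are below) =====
def Claim_equal_create_grad_var_names : Prop := ∀ (in_vars : List String) (grad_type : String) (ndim : Int), Dom_create_grad_var_names in_vars grad_type ndim → Spec_create_grad_var_names in_vars grad_type ndim (create_grad_var_names in_vars grad_type ndim)

-- ===== LEMMAS AND PROOFS =====

theorem join3 (a b c : String) : PySem.Str.join "_" [a, b, c] = a ++ "_" ++ b ++ "_" ++ c := by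
  rw [← String.toList_inj]
  simp [PySem.Str.join, PySem.Chars.join_cons_cons, PySem.Chars.join_singleton]

theorem join4 (a b c d : String) : PySem.Str.join "_" [a, b, c, d] = a ++ "_" ++ b ++ "_" ++ c ++ "_" ++ d := by
  rw [← String.toList_inj]
  simp [PySem.Str.join, PySem.Chars.join_cons_cons, PySem.Chars.join_singleton]

theorem dict_items : (PySem.Dict.ofList [("grad", (1 : Int)), ("grad2", 2), ("agrad", 1)]).items
    = [("grad", 1), ("grad2", 2), ("agrad", 1)] := by decide

theorem flatten_map_singleton {α β : Type} (l : List α) (f : α → β) :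
    (l.map (fun x => [f x])).flatten = l.map f := by
  induction l with
  | nil => simp
  | cons x xs ih => simp [ih]

theorem range01 : PySem.List.pyRange 0 1 1 = [0] := by decide
theorem range02 : PySem.List.pyRange 0 2 1 = [0, 1] := by decide

-- ===== VERDICT (by name: the statement is the Claim_ definition above) =====
theorem create_grad_var_names_spec : Claim_equal_create_grad_var_names := by
  intro in_vars grad_type ndim _
  unfold Spec_create_grad_var_names create_grad_var_names create_grad_var_names_alt
  by_cases h1 : grad_type = "grad"
  · subst h1
    simp [PySem.Dict.get?, dict_items, range01, flatten_map_singleton, Function.comp_def,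
      join3, List.flatMap, List.map_map]
  · by_cases h2 : grad_type = "grad2"
    · subst h2
      simp [PySem.Dict.get?, dict_items, range02, flatten_map_singleton, Function.comp_def,
        join4, List.flatMap, List.map_map]
    · by_cases h3 : grad_type = "agrad"
      · subst h3
        simp [PySem.Dict.get?, dict_items, range01, flatten_map_singleton, Function.comp_def,
          join3, List.flatMap, List.map_map]
      · have e1 : ("grad" == grad_type) = false := by simp [Ne.symm h1]
        have e2 : ("grad2" == grad_type) = false := by simp [Ne.symm h2]
        have e3 : ("agrad" == grad_type) = false := by simp [Ne.symm h3]
        simp [PySem.Dict.get?, dict_items, List.find?, h1, h2, h3, e1, e2, e3]
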